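-- pv_equiv track=rewrite | github.com/ralph-groupscholar/groupscholar-intake-normalizer | src/normalizer.py | derive_review_status
-- ===== SOURCE A (Python) =====
-- from typing import Dict, List, Optional, Tuple
--
-- CRITICAL_FLAGS = {
--     "missing_applicant_id",
--     "missing_name",
--     "missing_email",
--     "invalid_email",
--     "missing_program",
--     "invalid_submission_date",
-- }
--
-- HIGH_FLAGS = {
--     "gpa_out_of_range",
--     "invalid_gpa",
--     "future_submission_date",
--     "missing_submission_date",
--     "graduation_year_out_of_range",
--     "invalid_graduation_year",
--     "missing_citizenship_status",
--     "unrecognized_citizenship_status",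
-- }
--
-- def derive_review_status(flags: List[str]) -> Tuple[str, str]:
--     if any(flag in CRITICAL_FLAGS for flag in flags):
--         return "incomplete", "high"
--     if any(flag in HIGH_FLAGS for flag in flags):
--         return "needs_review", "medium"
--     if flags:
--         return "needs_follow_up", "low"
--     return "ready", "ready"
-- ===== SOURCE B (Python) =====
-- _SEVERITY = {
--     "missing_applicant_id": 3,
--     "missing_name": 3,
--     "missing_email": 3,
--     "invalid_email": 3,
--     "missing_program": 3,
--     "invalid_submission_date": 3,
--     "gpa_out_of_range": 2,
--     "invalid_gpa": 2,
--     "future_submission_date": 2,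
--     "missing_submission_date": 2,
--     "graduation_year_out_of_range": 2,
--     "invalid_graduation_year": 2,
--     "missing_citizenship_status": 2,
--     "unrecognized_citizenship_status": 2,
-- }
--
-- _RESULT = [
--     ("ready", "ready"),
--     ("needs_follow_up", "low"),
--     ("needs_review", "medium"),
--     ("incomplete", "high"),
-- ]
--
--
-- def derive_review_status(flags):
--     level = max((_SEVERITY.get(f, 1) for f in flags), default=0)
--     return _RESULT[level]
-- ===== Notes on version B (the rewrite author's own statement) =====
-- stated objective: simpler
-- what changed: Replaced the precedence-ordered early-exit membership branching with a single max-reduction of per-flag severity levels looked up in one table, followed by indexing a level->result table.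
import Mathlib
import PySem

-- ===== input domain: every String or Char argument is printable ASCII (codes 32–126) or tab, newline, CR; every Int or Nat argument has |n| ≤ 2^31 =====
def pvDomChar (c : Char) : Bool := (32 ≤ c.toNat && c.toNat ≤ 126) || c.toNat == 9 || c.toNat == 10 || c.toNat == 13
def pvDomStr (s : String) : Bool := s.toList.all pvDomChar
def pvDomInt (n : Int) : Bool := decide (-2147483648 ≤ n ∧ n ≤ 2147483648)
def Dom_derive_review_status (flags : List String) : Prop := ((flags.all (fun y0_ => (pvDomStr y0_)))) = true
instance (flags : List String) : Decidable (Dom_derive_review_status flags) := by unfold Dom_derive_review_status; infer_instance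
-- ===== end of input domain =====

-- B replaces A's precedence-ordered early-exit membership branching with a single
-- max-reduction over a per-flag severity table plus a level->result table; objective: simpler.

-- ===== PORT A =====
def CRITICAL_FLAGS : List String := PySem.Set.ofList
  ["missing_applicant_id", "missing_name", "missing_email", "invalid_email",
   "missing_program", "invalid_submission_date"]

def HIGH_FLAGS : List String := PySem.Set.ofList
  ["gpa_out_of_range", "invalid_gpa", "future_submission_date", "missing_submission_date",
   "graduation_year_out_of_range", "invalid_graduation_year",
   "missing_citizenship_status", "unrecognized_citizenship_status"]

def derive_review_status (flags : List String) : String × String :=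
  if flags.any (fun flag => CRITICAL_FLAGS.contains flag) then ("incomplete", "high")
  else if flags.any (fun flag => HIGH_FLAGS.contains flag) then ("needs_review", "medium")
  else if !flags.isEmpty then ("needs_follow_up", "low")
  else ("ready", "ready")

-- ===== PORT B =====
def pvSeverity : PySem.Dict String Int := PySem.Dict.ofList
  [("missing_applicant_id", 3), ("missing_name", 3), ("missing_email", 3),
   ("invalid_email", 3), ("missing_program", 3), ("invalid_submission_date", 3),
   ("gpa_out_of_range", 2), ("invalid_gpa", 2), ("future_submission_date", 2),
   ("missing_submission_date", 2), ("graduation_year_out_of_range", 2),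
   ("invalid_graduation_year", 2), ("missing_citizenship_status", 2),
   ("unrecognized_citizenship_status", 2)]

def pvResult : List (String × String) :=
  [("ready", "ready"), ("needs_follow_up", "low"),
   ("needs_review", "medium"), ("incomplete", "high")]

-- level is always 0..3, so _RESULT[level] never raises; pyGetD's default is unreachable
def derive_review_status_alt (flags : List String) : String × String :=
  let level : Int := PySem.List.maxD (flags.map (fun f => pvSeverity.getD f 1)) id 0
  PySem.List.pyGetD pvResult level ("ready", "ready")

-- ===== PRECONDITION & SPEC =====
def Spec_derive_review_status (flags : List String) (out : String × String) : Prop := out = derive_review_status_alt flags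
instance (flags : List String) (out : String × String) : Decidable (Spec_derive_review_status flags out) := by unfold Spec_derive_review_status; infer_instance

-- ===== CLAIM (what is proved, stated in full; the proofs are below) =====
def Claim_equal_derive_review_status : Prop := ∀ (flags : List String), Dom_derive_review_status flags → Spec_derive_review_status flags (derive_review_status flags)

-- ===== LEMMAS AND PROOFS =====

def pvSev (f : String) : Int := pvSeverity.getD f 1

lemma crit_lit : CRITICAL_FLAGS =
    ["missing_applicant_id", "missing_name", "missing_email", "invalid_email",
     "missing_program", "invalid_submission_date"] := by decide

lemma high_lit : HIGH_FLAGS =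
    ["gpa_out_of_range", "invalid_gpa", "future_submission_date", "missing_submission_date",
     "graduation_year_out_of_range", "invalid_graduation_year",
     "missing_citizenship_status", "unrecognized_citizenship_status"] := by decide

lemma pvSev_cases (f : String) :
    pvSev f = if CRITICAL_FLAGS.contains f then 3 else if HIGH_FLAGS.contains f then 2 else 1 := by
  rw [crit_lit, high_lit]
  by_cases hc : f ∈ ["missing_applicant_id", "missing_name", "missing_email", "invalid_email",
      "missing_program", "invalid_submission_date"]
  · rw [if_pos (by simpa using hc)]
    fin_cases hc <;> decide
  · rw [if_neg (by simpa using hc)]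
    by_cases hh : f ∈ ["gpa_out_of_range", "invalid_gpa", "future_submission_date",
        "missing_submission_date", "graduation_year_out_of_range", "invalid_graduation_year",
        "missing_citizenship_status", "unrecognized_citizenship_status"]
    · rw [if_pos (by simpa using hh)]
      fin_cases hh <;> decide
    · rw [if_neg (by simpa using hh)]
      have hd : pvSeverity = PySem.Dict.mk
        [("missing_applicant_id", 3), ("missing_name", 3), ("missing_email", 3),
         ("invalid_email", 3), ("missing_program", 3), ("invalid_submission_date", 3),
         ("gpa_out_of_range", 2), ("invalid_gpa", 2), ("future_submission_date", 2),
         ("missing_submission_date", 2), ("graduation_year_out_of_range", 2),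
         ("invalid_graduation_year", 2), ("missing_citizenship_status", 2),
         ("unrecognized_citizenship_status", 2)] := by decide
      simp only [List.mem_cons, List.not_mem_nil, or_false, not_or] at hc hh
      obtain ⟨h1, h2, h3, h4, h5, h6⟩ := hc
      obtain ⟨g1, g2, g3, g4, g5, g6, g7, g8⟩ := hh
      simp [pvSev, hd, PySem.Dict.getD, PySem.Dict.get?, PySem.Dict.get?_mk_cons,
        Ne.symm h1, Ne.symm h2, Ne.symm h3, Ne.symm h4, Ne.symm h5, Ne.symm h6,
        Ne.symm g1, Ne.symm g2, Ne.symm g3, Ne.symm g4, Ne.symm g5, Ne.symm g6,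
        Ne.symm g7, Ne.symm g8]

lemma pvSev_bounds (f : String) : 1 ≤ pvSev f ∧ pvSev f ≤ 3 := by
  rw [pvSev_cases]; split_ifs <;> omega

def pvG (fs : List String) (m : Int) : Int := fs.foldl (fun a f => max a (pvSev f)) m

lemma pvMax?_cons : ∀ (fs : List String) (m : Int),
    PySem.List.max? (m :: fs.map pvSev) id = some (pvG fs m) := by
  intro fs
  induction fs with
  | nil => intro m; simp [PySem.List.max?, pvG]
  | cons f fs ih =>
    intro m
    have h1 : PySem.List.max? (m :: (f :: fs).map pvSev) id
        = PySem.List.max? (max m (pvSev f) :: fs.map pvSev) id := by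
      simp only [PySem.List.max?, List.map_cons, List.foldl_cons, id]
      rcases le_or_gt (pvSev f) m with h | h
      · rw [if_neg (not_lt.mpr h), max_eq_left h]
      · rw [if_pos h, max_eq_right h.le]
    rw [h1, ih (max m (pvSev f))]
    simp [pvG]

lemma pvG_char : ∀ (fs : List String) (m : Int), 1 ≤ m → m ≤ 3 →
    pvG fs m = max m (if fs.any (fun f => CRITICAL_FLAGS.contains f) then 3
      else if fs.any (fun f => HIGH_FLAGS.contains f) then 2 else 1) := by
  intro fs
  induction fs with
  | nil => intro m h1 h3; simp [pvG]; omega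
  | cons f fs ih =>
    intro m h1 h3
    have hb := pvSev_bounds f
    have hstep : pvG (f :: fs) m = pvG fs (max m (pvSev f)) := by simp [pvG]
    rw [hstep, ih (max m (pvSev f)) (by omega) (by omega)]
    have hs := pvSev_cases f
    simp only [List.any_cons]
    by_cases hc : CRITICAL_FLAGS.contains f
    · simp only [hc, Bool.true_or, if_pos]; rw [hc] at hs; simp at hs
      split_ifs <;> omega
    · simp only [Bool.not_eq_true] at hc
      rw [hc] at hs
      by_cases hh : HIGH_FLAGS.contains f
      · rw [hh] at hs; simp at hs
        simp only [hc, hh, Bool.false_or, Bool.true_or]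
        split_ifs <;> omega
      · simp only [Bool.not_eq_true] at hh
        rw [hh] at hs; simp at hs
        simp only [hc, hh, Bool.false_or]
        split_ifs <;> omega

-- ===== VERDICT (by name: the statement is the Claim_ definition above) =====
theorem derive_review_status_spec : Claim_equal_derive_review_status := by
  intro flags _
  unfold Spec_derive_review_status
  cases flags with
  | nil => decide
  | cons f fs =>
    unfold derive_review_status derive_review_status_alt
    simp only [show (fun f => pvSeverity.getD f 1) = pvSev from rfl,
      PySem.List.maxD, List.map_cons]
    rw [pvMax?_cons fs (pvSev f)]
    have hb := pvSev_bounds f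
    rw [Option.getD_some, pvG_char fs (pvSev f) hb.1 hb.2]
    have hs := pvSev_cases f
    simp only [List.any_cons, List.isEmpty_cons, Bool.not_false]
    by_cases hc : CRITICAL_FLAGS.contains f <;>
      by_cases ac : fs.any (fun flag => CRITICAL_FLAGS.contains flag) <;>
      by_cases hh : HIGH_FLAGS.contains f <;>
      by_cases ah : fs.any (fun flag => HIGH_FLAGS.contains flag) <;>
      simp only [hc, ac, hh, ah, if_pos, if_neg, Bool.true_or, Bool.false_or,
        Bool.or_self, Bool.or_false, Bool.or_true, if_true, if_false] at hs ⊢ <;>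
      rw [hs] <;> decide
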